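-- pv_equiv track=rewrite | github.com/andrewjmcgehee/Kattis | Python/nine/nine.py | solve
-- ===== SOURCE A (Python) =====
-- mod = 1000000007
--
-- def solve(n):
--   # trivial cases
--   if n == 0:
--     return 1
--   if n == 1:
--     return 9
--   # the intuition is this:
--   # if we have 7 digits, this is the same as having 9 * 6 digits because
--   # the leading digit can be 1-9 but not 0
--
--   # but if we have 6 digits remaining with the leading digit already considered
--   # we have 10 options (0-9) for each digit so we have 10^6 options
--   # but 10^6 can be written at 10^3 * 10^3 or (10^3)^2, so we can simply calculate
--   # as if we have 3 digits instead of 6, then we can square the result and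
--   # multiple by 9 and get the same result. that results in the following
--   # geometric series
--
--   # if number of digits is odd the geometric series follows this formula
--   if n & 1:
--     tmp = solve((n - 1) // 2)
--     return 9 * tmp**2 % mod
--   # if number of digits is even the geometric series follows this formula
--   else:
--     tmp = solve(n // 2)
--     return tmp**2 % mod
-- ===== SOURCE B (Python) =====
-- mod = 1000000007
--
-- def solve(n):
--   # solve(n) == 9**n mod 1000000007: iterative binary exponentiation.
--   result = 1
--   base = 9
--   while n > 0:
--     if n & 1:
--       result = result * base % mod
--     base = base * base % mod
--     n >>= 1
--   return result
-- ===== Notes on version B (the rewrite author's own statement) =====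
-- stated objective: simpler
-- what changed: Replaced the odd/even self-recursion by the closed form 9^n mod 1000000007, computed with an iterative binary-exponentiation loop over the bits of n.
import Mathlib
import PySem

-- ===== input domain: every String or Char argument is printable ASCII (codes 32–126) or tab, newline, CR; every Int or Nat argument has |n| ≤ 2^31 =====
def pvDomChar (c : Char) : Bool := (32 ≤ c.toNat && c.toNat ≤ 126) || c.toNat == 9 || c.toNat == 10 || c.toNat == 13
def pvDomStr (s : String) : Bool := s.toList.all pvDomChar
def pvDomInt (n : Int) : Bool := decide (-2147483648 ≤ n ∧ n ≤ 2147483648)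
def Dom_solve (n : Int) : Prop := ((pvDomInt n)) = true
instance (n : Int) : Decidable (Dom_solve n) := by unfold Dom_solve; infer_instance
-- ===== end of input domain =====

-- B replaces A's odd/even self-recursion by iterative binary exponentiation computing 9^n mod 1000000007 (simpler).


-- ===== PORT A =====
-- A recurses on (n-1)//2 resp. n//2; the fuel argument only makes it total in Lean
-- (fuel n.toNat + 1 suffices for every n ≥ 0; for n < 0 Python never returns).
def solveAux : Nat → Int → Int
  | 0, _ => 0
  | fuel + 1, n =>
    if n = 0 then 1
    else if n = 1 then 9
    else if PySem.Int.band n 1 = 1 then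
      9 * (solveAux fuel (PySem.Int.floordiv (n - 1) 2)) ^ 2 % 1000000007
    else
      (solveAux fuel (PySem.Int.floordiv n 2)) ^ 2 % 1000000007

def solve (n : Int) : Int := solveAux (n.toNat + 1) n

-- ===== PORT B =====
-- while n > 0: if n & 1: result = result*base % mod; base = base*base % mod; n >>= 1
-- (n carried as a Nat: for n ≤ 0 the Python loop never runs, matching Nat 0).
def powLoop : Nat → Nat → Int → Int → Int
  | 0, _, result, _ => result
  | _ + 1, 0, result, _ => result
  | fuel + 1, m, result, base =>
    powLoop fuel (m / 2) (if m % 2 = 1 then result * base % 1000000007 else result)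
      (base * base % 1000000007)

def solve_alt (n : Int) : Int := powLoop (n.toNat + 1) n.toNat 1 9

-- ===== PRECONDITION & SPEC =====
-- Pre_ excludes exactly n < 0, where Python A recurses forever (RecursionError).
def Pre_solve (n : Int) : Prop := 0 ≤ n
instance (n : Int) : Decidable (Pre_solve n) := by unfold Pre_solve; infer_instance
def pvWitness_solve : Int := 6

def Spec_solve (n : Int) (out : Int) : Prop := out = solve_alt n
instance (n : Int) (out : Int) : Decidable (Spec_solve n out) := by unfold Spec_solve; infer_instance

-- ===== CLAIM (what is proved, stated in full; the proofs are below) =====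
def Claim_equal_solve : Prop := ∀ (n : Int), Dom_solve n → Pre_solve n → Spec_solve n (solve n)

-- ===== LEMMAS AND PROOFS =====

theorem pvEmodSelf (a : Int) : a % 1000000007 ≡ a [ZMOD 1000000007] :=
  Int.emod_emod_of_dvd a dvd_rfl

theorem solveAux_eq_pow (f : Nat) : ∀ (n : Int), 0 ≤ n → n.toNat < f →
    solveAux f n = 9 ^ n.toNat % 1000000007 := by
  induction f with
  | zero => intro n _ h; omega
  | succ f ih =>
    intro n hn hf
    rcases eq_or_lt_of_le hn with h0 | hpos
    · simp [solveAux, ← h0]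
    rcases eq_or_lt_of_le (by omega : (1 : Int) ≤ n) with h1 | h2
    · simp [solveAux, ← h1]
    · -- n ≥ 2
      have hb : PySem.Int.band n 1 = PySem.Int.mod n 2 := PySem.Int.band_one n
      rw [PySem.Int.mod_eq_emod_of_pos (by omega : (0:Int) < 2)] at hb
      by_cases hodd : n % 2 = 1
      · have hm : PySem.Int.floordiv (n - 1) 2 = (n - 1) / 2 :=
          PySem.Int.floordiv_eq_ediv_of_pos (by omega)
        have hrec := ih ((n - 1) / 2) (by omega) (by omega)
        simp only [solveAux, if_neg (by omega : ¬ n = 0), if_neg (by omega : ¬ n = 1),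
          hb, if_pos hodd, hm, hrec]
        have hcong : (9 : Int) * ((9 : Int) ^ ((n - 1) / 2).toNat % 1000000007) ^ 2
            ≡ 9 * ((9 : Int) ^ ((n - 1) / 2).toNat) ^ 2 [ZMOD 1000000007] :=
          Int.ModEq.mul_left 9 ((pvEmodSelf _).pow 2)
        calc 9 * ((9 : Int) ^ ((n - 1) / 2).toNat % 1000000007) ^ 2 % 1000000007
            = 9 * ((9 : Int) ^ ((n - 1) / 2).toNat) ^ 2 % 1000000007 := hcong
          _ = 9 ^ n.toNat % 1000000007 := by
              rw [show n.toNat = 2 * ((n - 1) / 2).toNat + 1 from by omega]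
              congr 1
              ring
      · have hm : PySem.Int.floordiv n 2 = n / 2 :=
          PySem.Int.floordiv_eq_ediv_of_pos (by omega)
        have hrec := ih (n / 2) (by omega) (by omega)
        simp only [solveAux, if_neg (by omega : ¬ n = 0), if_neg (by omega : ¬ n = 1),
          hb, if_neg hodd, hm, hrec]
        have hcong : ((9 : Int) ^ (n / 2).toNat % 1000000007) ^ 2
            ≡ ((9 : Int) ^ (n / 2).toNat) ^ 2 [ZMOD 1000000007] :=
          (pvEmodSelf _).pow 2
        calc ((9 : Int) ^ (n / 2).toNat % 1000000007) ^ 2 % 1000000007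
            = ((9 : Int) ^ (n / 2).toNat) ^ 2 % 1000000007 := hcong
          _ = 9 ^ n.toNat % 1000000007 := by
              rw [show n.toNat = 2 * (n / 2).toNat from by omega]
              congr 1
              ring

theorem powLoop_eq_pow (f : Nat) : ∀ (m : Nat) (r b : Int), 1 ≤ m → m < f →
    powLoop f m r b = r * b ^ m % 1000000007 := by
  induction f with
  | zero => intro m r b _ h; omega
  | succ f ih =>
    intro m r b hm hf
    match m, hm with
    | m + 1, _ =>
      show powLoop f ((m + 1) / 2)
          (if (m + 1) % 2 = 1 then r * b % 1000000007 else r)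
          (b * b % 1000000007) = _
      by_cases hsmall : (m + 1) / 2 = 0
      · have hm1 : m = 0 := by omega
        subst hm1
        cases f with
        | zero => omega
        | succ f => simp [powLoop, pow_one]
      · rw [ih ((m + 1) / 2) _ _ (by omega) (by omega)]
        rcases Nat.even_or_odd (m + 1) with he | ho
        · obtain ⟨k, hk⟩ := he
          rw [if_neg (by omega), show (m + 1) / 2 = k from by omega]
          have hcong : r * ((b * b % 1000000007) ^ k)
              ≡ r * ((b * b) ^ k) [ZMOD 1000000007] :=
            Int.ModEq.mul_left r ((pvEmodSelf _).pow k)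
          calc r * (b * b % 1000000007) ^ k % 1000000007
              = r * (b * b) ^ k % 1000000007 := hcong
            _ = r * b ^ (m + 1) % 1000000007 := by
                rw [show m + 1 = 2 * k from by omega]
                congr 1
                ring
        · obtain ⟨k, hk⟩ := ho
          rw [if_pos (by omega), show (m + 1) / 2 = k from by omega]
          have hcong : (r * b % 1000000007) * ((b * b % 1000000007) ^ k)
              ≡ (r * b) * ((b * b) ^ k) [ZMOD 1000000007] :=
            (pvEmodSelf _).mul ((pvEmodSelf _).pow k)
          calc (r * b % 1000000007) * (b * b % 1000000007) ^ k % 1000000007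
              = (r * b) * (b * b) ^ k % 1000000007 := hcong
            _ = r * b ^ (m + 1) % 1000000007 := by
                rw [show m + 1 = 2 * k + 1 from by omega]
                congr 1
                ring

-- ===== VERDICT (by name: the statement is the Claim_ definition above) =====
theorem solve_spec : Claim_equal_solve := by
  intro n _ hpre
  unfold Spec_solve solve solve_alt
  rcases eq_or_lt_of_le hpre with h0 | hpos
  · simp [← h0, solveAux, powLoop]
  · rw [solveAux_eq_pow _ n hpre (by omega),
      powLoop_eq_pow _ n.toNat 1 9 (by omega) (by omega), one_mul]
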